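-- pv_equiv track=rewrite | github.com/jcp0578/practise-Python | codewar/Next bigger number with the same digits -4k/Next bigger number with the same digits.py | next_bigger_t
-- ===== SOURCE A (Python) =====
-- def list_to_num(list_t=[]):
--     out=0
--     for t in list_t:
--         out = out *10 +t
--     return out
--
-- def next_bigger_t(num_list=[]):
--     n =list_to_num(num_list)
--     num_list_out=[]
--     num_list_temp=[]
--     len_t = len(num_list)
--     for i in range(len_t-1,0,-1):
--         for j in range(i-1,-1,-1):
--             if num_list[i] > num_list[j]:
--                 num_list_out=num_list[:j]
--                 num_list_out.append(num_list[i])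
--                 num_list.pop(i)
--                 num_list_temp=num_list[j:]
--                 num_list_temp.sort()
--                 num_list_out=num_list_out+num_list_temp
--                 out =list_to_num(num_list_out)
--                 if out <= n :
--                     return -1
--                 else :
--                     return out
--     return -1
-- ===== SOURCE B (Python) =====
-- def next_bigger_t(num_list=[]):
--     # single forward prefix-min pass to find the pivot, instead of A's nested scans
--     n = 0
--     for t in num_list:
--         n = n * 10 + t
--     ln = len(num_list)
--     i = -1
--     m = num_list[0] if ln else 0
--     for k in range(1, ln):
--         if num_list[k] > m:
--             i = k
--         if num_list[k] < m:
--             m = num_list[k]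
--     if i == -1:
--         return -1
--     # largest j < i with num_list[j] < num_list[i]
--     j = i - 1
--     while num_list[j] >= num_list[i]:
--         j -= 1
--     out_list = num_list[:j] + [num_list[i]] + sorted(num_list[j:i] + num_list[i + 1:])
--     out = 0
--     for t in out_list:
--         out = out * 10 + t
--     return out if out > n else -1
-- ===== Notes on version B (the rewrite author's own statement) =====
-- stated objective: faster
-- what changed: A's nested descending scans over (i, j) pairs are replaced by a single forward prefix-minimum pass that finds the pivot i, one backward scan for j, and a sort of the suffix, removing the quadratic pivot search; B also does not mutate the input list (A pops from it).
import Mathlib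
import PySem

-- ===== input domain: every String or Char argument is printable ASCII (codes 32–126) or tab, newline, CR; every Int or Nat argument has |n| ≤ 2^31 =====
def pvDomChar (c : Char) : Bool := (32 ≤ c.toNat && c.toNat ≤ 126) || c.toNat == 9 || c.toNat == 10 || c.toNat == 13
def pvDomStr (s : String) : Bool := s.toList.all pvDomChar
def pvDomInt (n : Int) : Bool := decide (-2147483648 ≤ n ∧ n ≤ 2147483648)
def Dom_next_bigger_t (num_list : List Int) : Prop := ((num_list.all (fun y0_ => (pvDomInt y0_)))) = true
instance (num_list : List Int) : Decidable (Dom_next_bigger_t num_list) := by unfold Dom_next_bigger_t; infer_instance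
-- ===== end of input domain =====

-- B replaces A's nested pivot scans by one forward prefix-min pass.
-- Python A mutates its argument (pop); the equivalence proved is about the RETURN value only; B does not mutate.

-- first-Some early-return fold (shape of Python's 'return' inside a for loop)
def pvFirstSome {α β : Type} (l : List α) (f : α → Option β) : Option β :=
  l.foldl (fun acc x => match acc with | some r => some r | none => f x) none

-- ===== PORT A =====
def pvListToNum (l : List Int) : Int := l.foldl (fun out t => out * 10 + t) 0

-- body of A's 'if num_list[i] > num_list[j]' branch (builds the candidate and applies the 'out <= n' check)
def pvBuildA (a : List Int) (n i j : Int) : Int :=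
  let num_list_out := PySem.List.slice a none (some j) ++ [PySem.List.pyGetD a i 0]
  let rest := match PySem.List.pop? a i with
    | some r => r.2
    | none => []   -- unreachable: i is always in range here
  let num_list_temp := PySem.List.sorted (PySem.List.slice rest (some j) none) (fun x => x) false
  let out := pvListToNum (num_list_out ++ num_list_temp)
  if out ≤ n then -1 else out

-- A's inner 'for j' loop (early return as Option)
def pvInnerA (a : List Int) (n : Int) (i : Int) : Option Int :=
  pvFirstSome (PySem.List.pyRange (i - 1) (-1) (-1)) (fun j =>
    if PySem.List.pyGetD a i 0 > PySem.List.pyGetD a j 0 then some (pvBuildA a n i j) else none)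

def next_bigger_t (num_list : List Int) : Int :=
  let n := pvListToNum num_list
  let len_t : Int := num_list.length
  (pvFirstSome (PySem.List.pyRange (len_t - 1) 0 (-1)) (fun i => pvInnerA num_list n i)).getD (-1)

-- ===== PORT B =====
-- 'while num_list[j] >= num_list[i]: j -= 1' starting at j = i-1 (on reachable states a hit exists at or before 0)
def pvFindJ (a : List Int) (ai : Int) : Nat → Nat
  | 0 => 0
  | t + 1 => if PySem.List.pyGetD a ((t : Int) + 1) 0 < ai then t + 1 else pvFindJ a ai t

def next_bigger_t_alt (num_list : List Int) : Int :=
  let n := pvListToNum num_list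
  let ln : Int := num_list.length
  let m0 := PySem.List.pyGetD num_list 0 0      -- num_list[0] if ln else 0
  let p := (PySem.List.pyRange 1 ln 1).foldl (fun (p : Int × Int) k =>
      let ak := PySem.List.pyGetD num_list k 0
      (if ak > p.2 then k else p.1, if ak < p.2 then ak else p.2)) (-1, m0)
  let i := p.1
  if i = -1 then -1
  else
    let ai := PySem.List.pyGetD num_list i 0
    let j : Int := (pvFindJ num_list ai (i - 1).toNat : Nat)
    let out_list := PySem.List.slice num_list none (some j) ++ [ai]
        ++ PySem.List.sorted (PySem.List.slice num_list (some j) (some i)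
             ++ PySem.List.slice num_list (some (i + 1)) none) (fun x => x) false
    let out := pvListToNum out_list
    if out > n then out else -1

-- ===== PRECONDITION & SPEC =====
def Spec_next_bigger_t (num_list : List Int) (out : Int) : Prop := out = next_bigger_t_alt num_list
instance (num_list : List Int) (out : Int) : Decidable (Spec_next_bigger_t num_list out) := by unfold Spec_next_bigger_t; infer_instance

-- ===== CLAIM (what is proved, stated in full; the proofs are below) =====
def Claim_equal_next_bigger_t : Prop := ∀ (num_list : List Int), Dom_next_bigger_t num_list → Spec_next_bigger_t num_list (next_bigger_t num_list)

-- ===== LEMMAS AND PROOFS =====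

-- minimum of a[0..t]
def pvMinpref (a : List Int) : Nat → Int
  | 0 => a.getD 0 0
  | t + 1 => if a.getD (t + 1) 0 < pvMinpref a t then a.getD (t + 1) 0 else pvMinpref a t

-- largest k in [1,t] with a[k] > pvMinpref (k-1); -1 if none
def pvBestI (a : List Int) : Nat → Int
  | 0 => -1
  | t + 1 => if a.getD (t + 1) 0 > pvMinpref a t then ((t : Int) + 1) else pvBestI a t

-- largest j ≤ t with a[j] < ai; -1 if none
def pvMaxJ (a : List Int) (ai : Int) : Nat → Int
  | 0 => if a.getD 0 0 < ai then 0 else -1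
  | t + 1 => if a.getD (t + 1) 0 < ai then ((t : Int) + 1) else pvMaxJ a ai t

theorem pvFoldl_some {α β : Type} (l : List α) (f : α → Option β) (r : β) :
    l.foldl (fun acc x => match acc with | some r => some r | none => f x) (some r) = some r := by
  induction l with
  | nil => rfl
  | cons x l ih => simpa using ih

theorem pvFirstSome_cons_some {α β : Type} (x : α) (l : List α) (f : α → Option β) (r : β)
    (h : f x = some r) : pvFirstSome (x :: l) f = some r := by
  unfold pvFirstSome
  simp only [List.foldl_cons, h, pvFoldl_some]

theorem pvFirstSome_cons_none {α β : Type} (x : α) (l : List α) (f : α → Option β)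
    (h : f x = none) : pvFirstSome (x :: l) f = pvFirstSome l f := by
  unfold pvFirstSome
  simp only [List.foldl_cons, h]

-- pvMaxJ is -1 exactly when nothing below ai occurs in a[0..t]
theorem pvMaxJ_neg_iff (a : List Int) (ai : Int) (t : Nat) :
    pvMaxJ a ai t = -1 ↔ ai ≤ pvMinpref a t := by
  induction t with
  | zero =>
      simp only [pvMaxJ, pvMinpref]
      split_ifs with h <;> constructor <;> intro h2 <;> first | exact h2.elim | omega
  | succ t ih =>
      simp only [pvMaxJ, pvMinpref]
      split_ifs with h1 h2
      · constructor <;> intro h3 <;> first | exact h3.elim | omega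
      · constructor <;> intro h3 <;> first | exact h3.elim | omega
      · rw [ih]; constructor <;> intro <;> omega
      · exact ih

-- shape of pvMaxJ when it is not -1
theorem pvMaxJ_shape (a : List Int) (ai : Int) (t : Nat) :
    pvMaxJ a ai t = -1 ∨ ∃ jn : Nat, pvMaxJ a ai t = (jn : Int) ∧ jn ≤ t ∧ a.getD jn 0 < ai := by
  induction t with
  | zero =>
      by_cases h : a.getD 0 0 < ai
      · exact Or.inr ⟨0, by simp only [pvMaxJ, if_pos h]; norm_num, le_refl 0, h⟩
      · exact Or.inl (by simp only [pvMaxJ, if_neg h])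
  | succ t ih =>
      by_cases h : a.getD (t + 1) 0 < ai
      · exact Or.inr ⟨t + 1, by simp only [pvMaxJ, if_pos h]; push_cast; ring, le_refl _, h⟩
      · rcases ih with h0 | ⟨jn, h1, h2, h3⟩
        · exact Or.inl (by simp only [pvMaxJ, if_neg h]; exact h0)
        · exact Or.inr ⟨jn, by simp only [pvMaxJ, if_neg h]; exact h1, Nat.le_succ_of_le h2, h3⟩

-- pvFindJ agrees with pvMaxJ whenever a hit exists
theorem pvFindJ_eq (a : List Int) (ai : Int) (t jn : Nat) (h : pvMaxJ a ai t = (jn : Int)) :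
    pvFindJ a ai t = jn := by
  induction t with
  | zero =>
      simp only [pvMaxJ] at h
      simp only [pvFindJ]
      split_ifs at h with h1 <;> omega
  | succ t ih =>
      simp only [pvMaxJ] at h
      have hc : PySem.List.pyGetD a ((t : Int) + 1) 0 = a.getD (t + 1) 0 := by
        have h2 : ((t : Int) + 1) = ((t + 1 : Nat) : Int) := by push_cast; ring
        rw [h2, PySem.List.pyGetD_natCast]
      simp only [pvFindJ, hc]
      split_ifs at h ⊢ with h1
      · omega
      · exact ih h

-- A's inner loop over range(t, -1, -1) returns the candidate at the largest qualifying j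
theorem pvInnerLoop (a : List Int) (ai : Int) (g : Int → Int) (t : Nat) :
    pvFirstSome (PySem.List.pyRange (t : Int) (-1) (-1))
        (fun j => if ai > PySem.List.pyGetD a j 0 then some (g j) else none)
      = if pvMaxJ a ai t = -1 then none else some (g (pvMaxJ a ai t)) := by
  induction t with
  | zero =>
      simp only [Nat.cast_zero]
      rw [PySem.List.pyRange_neg_one_cons (by omega)]
      rw [PySem.List.pyRange_neg_one_eq_nil (show (0 : Int) - 1 ≤ -1 by omega)]
      by_cases h : a.getD 0 0 < ai
      · rw [pvFirstSome_cons_some 0 [] (fun j => if ai > PySem.List.pyGetD a j 0 then some (g j) else none) (g 0)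
            (show (if ai > PySem.List.pyGetD a 0 0 then some (g 0) else none) = some (g 0) by
              rw [PySem.List.pyGetD_zero]; exact if_pos h)]
        simp only [pvMaxJ, if_pos h]
        rw [if_neg (show ¬(0 : Int) = -1 by omega)]
      · rw [pvFirstSome_cons_none 0 [] (fun j => if ai > PySem.List.pyGetD a j 0 then some (g j) else none)
            (show (if ai > PySem.List.pyGetD a 0 0 then some (g 0) else none) = none by
              rw [PySem.List.pyGetD_zero]; exact if_neg h)]
        simp only [pvMaxJ, if_neg h]
        rw [if_pos trivial]
        rfl
  | succ t ih =>
      rw [PySem.List.pyRange_neg_one_cons (by push_cast; omega : (-1 : Int) < ((t + 1 : Nat) : Int))]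
      rw [show ((t + 1 : Nat) : Int) = (t : Int) + 1 by push_cast; ring]
      rw [show (t : Int) + 1 - 1 = (t : Int) by ring]
      have hc : PySem.List.pyGetD a ((t : Int) + 1) 0 = a.getD (t + 1) 0 := by
        rw [show ((t : Int) + 1) = ((t + 1 : Nat) : Int) by push_cast; ring, PySem.List.pyGetD_natCast]
      by_cases h : a.getD (t + 1) 0 < ai
      · rw [pvFirstSome_cons_some ((t : Int) + 1) (PySem.List.pyRange (t : Int) (-1) (-1))
            (fun j => if ai > PySem.List.pyGetD a j 0 then some (g j) else none) (g ((t : Int) + 1))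
            (show (if ai > PySem.List.pyGetD a ((t : Int) + 1) 0
              then some (g ((t : Int) + 1)) else none) = some (g ((t : Int) + 1)) by
              rw [hc]; exact if_pos h)]
        simp only [pvMaxJ, if_pos h]
        rw [if_neg (show ¬(t : Int) + 1 = -1 by omega)]
      · rw [pvFirstSome_cons_none ((t : Int) + 1) (PySem.List.pyRange (t : Int) (-1) (-1))
            (fun j => if ai > PySem.List.pyGetD a j 0 then some (g j) else none)
            (show (if ai > PySem.List.pyGetD a ((t : Int) + 1) 0
              then some (g ((t : Int) + 1)) else none) = none by
              rw [hc]; exact if_neg h)]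
        simp only [pvMaxJ, if_neg h]
        exact ih

-- pvBestI is -1 or a qualifying index k in [1,t]
theorem pvBestI_shape (a : List Int) (t : Nat) :
    pvBestI a t = -1 ∨ ∃ k : Nat, pvBestI a t = (k : Int) ∧ 1 ≤ k ∧ k ≤ t ∧
      pvMinpref a (k - 1) < a.getD k 0 := by
  induction t with
  | zero => exact Or.inl rfl
  | succ t ih =>
      by_cases h : a.getD (t + 1) 0 > pvMinpref a t
      · exact Or.inr ⟨t + 1, by simp only [pvBestI, if_pos h]; omega, by omega, le_refl _, h⟩
      · rcases ih with h0 | ⟨k, h1, h2, h3, h4⟩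
        · exact Or.inl (by simp only [pvBestI, if_neg h]; exact h0)
        · exact Or.inr ⟨k, by simp only [pvBestI, if_neg h]; exact h1, h2, Nat.le_succ_of_le h3, h4⟩

-- A's outer loop over range(t, 0, -1) returns the inner result at the best pivot
theorem pvOuterLoop (a : List Int) (n : Int) (t : Nat) :
    pvFirstSome (PySem.List.pyRange (t : Int) 0 (-1)) (fun i => pvInnerA a n i)
      = if pvBestI a t = -1 then none else pvInnerA a n (pvBestI a t) := by
  induction t with
  | zero =>
      simp only [Nat.cast_zero]
      rw [PySem.List.pyRange_neg_one_eq_nil (by omega)]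
      rfl
  | succ t ih =>
      rw [PySem.List.pyRange_neg_one_cons (by push_cast; omega : (0 : Int) < ((t + 1 : Nat) : Int))]
      rw [show ((t + 1 : Nat) : Int) = (t : Int) + 1 by push_cast; ring]
      rw [show (t : Int) + 1 - 1 = (t : Int) by ring]
      have hgetd : PySem.List.pyGetD a ((t : Int) + 1) 0 = a.getD (t + 1) 0 := by
        rw [show ((t : Int) + 1) = ((t + 1 : Nat) : Int) by push_cast; ring, PySem.List.pyGetD_natCast]
      have hinner : pvInnerA a n ((t : Int) + 1)
          = if pvMaxJ a (a.getD (t + 1) 0) t = -1 then none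
            else some (pvBuildA a n ((t : Int) + 1) (pvMaxJ a (a.getD (t + 1) 0) t)) := by
        unfold pvInnerA
        rw [show (t : Int) + 1 - 1 = (t : Int) by ring, hgetd, pvInnerLoop]
      by_cases h : pvMaxJ a (a.getD (t + 1) 0) t = -1
      · have hb : a.getD (t + 1) 0 ≤ pvMinpref a t := (pvMaxJ_neg_iff a _ t).mp h
        have hbi : pvBestI a (t + 1) = pvBestI a t := by
          simp only [pvBestI, if_neg (show ¬ a.getD (t + 1) 0 > pvMinpref a t by omega)]
        rw [pvFirstSome_cons_none ((t : Int) + 1) (PySem.List.pyRange (t : Int) 0 (-1))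
            (fun i => pvInnerA a n i)
            (by show pvInnerA a n ((t : Int) + 1) = none; rw [hinner]; exact if_pos h), hbi]
        exact ih
      · have hb : pvMinpref a t < a.getD (t + 1) 0 := by
          by_contra hq
          exact h ((pvMaxJ_neg_iff a _ t).mpr (by omega))
        have hbi : pvBestI a (t + 1) = (t : Int) + 1 := by
          simp only [pvBestI, if_pos (show a.getD (t + 1) 0 > pvMinpref a t from hb)]
        rw [pvFirstSome_cons_some ((t : Int) + 1) (PySem.List.pyRange (t : Int) 0 (-1))
            (fun i => pvInnerA a n i) (pvBuildA a n ((t : Int) + 1) (pvMaxJ a (a.getD (t + 1) 0) t))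
            (by show pvInnerA a n ((t : Int) + 1) = _; rw [hinner]; exact if_neg h), hbi]
        rw [if_neg (show ¬(t : Int) + 1 = -1 by omega), hinner, if_neg h]

-- B's forward fold computes (pvBestI, pvMinpref)
theorem pvFoldB (a : List Int) (t : Nat) :
    (PySem.List.pyRange 1 ((t : Int) + 1) 1).foldl (fun (p : Int × Int) k =>
        let ak := PySem.List.pyGetD a k 0
        (if ak > p.2 then k else p.1, if ak < p.2 then ak else p.2)) (-1, a.getD 0 0)
      = (pvBestI a t, pvMinpref a t) := by
  induction t with
  | zero =>
      rw [PySem.List.pyRange_one_eq_nil (by omega)]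
      rfl
  | succ t ih =>
      have hsplit : PySem.List.pyRange 1 (((t + 1 : Nat) : Int) + 1) 1
          = PySem.List.pyRange 1 ((t : Int) + 1) 1 ++ [(t : Int) + 1] := by
        have : (((t + 1 : Nat) : Int) + 1) = ((t : Int) + 1) + 1 := by push_cast; ring
        rw [this, PySem.List.pyRange_one_succ_right (by omega)]
      rw [hsplit, List.foldl_append, ih]
      have hc : PySem.List.pyGetD a ((t : Int) + 1) 0 = a.getD (t + 1) 0 := by
        have : ((t : Int) + 1) = ((t + 1 : Nat) : Int) := by push_cast; ring
        rw [this, PySem.List.pyGetD_natCast]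
      simp only [List.foldl_cons, List.foldl_nil, hc]
      simp [pvBestI, pvMinpref]

-- slicing the popped list equals the two direct slices
theorem pvSliceErase (a : List Int) (jn k : Nat) (hjk : jn ≤ k) (hk : k < a.length) :
    PySem.List.slice (a.eraseIdx k) (some (jn : Int)) none
      = PySem.List.slice a (some (jn : Int)) (some (k : Int))
        ++ PySem.List.slice a (some ((k : Int) + 1)) none := by
  have h1 : ((k : Int) + 1) = ((k + 1 : Nat) : Int) := by push_cast; ring
  rw [PySem.List.slice_from_natCast, PySem.List.slice_natCast, h1, PySem.List.slice_from_natCast]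
  rw [List.eraseIdx_eq_take_drop_succ]
  rw [List.drop_append_of_le_length (by simp; omega)]
  rw [List.drop_take]

-- main equality for a nonempty list
theorem pvMainPos (a : List Int) (t : Nat) (hlen : a.length = t + 1) :
    next_bigger_t a = next_bigger_t_alt a := by
  unfold next_bigger_t next_bigger_t_alt
  simp only [hlen]
  rw [show ((t + 1 : Nat) : Int) - 1 = (t : Int) by push_cast; ring]
  rw [show ((t + 1 : Nat) : Int) = (t : Int) + 1 by push_cast; ring]
  rw [PySem.List.pyGetD_zero, pvFoldB, pvOuterLoop]
  rcases pvBestI_shape a t with hb | ⟨k, hb, hk1, hk2, hk4⟩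
  · rw [hb]
    simp
  · rw [hb]
    rw [show (((k : Int)), pvMinpref a t).1 = (k : Int) from rfl]
    have hkne : ¬ (k : Int) = -1 := by omega
    rw [if_neg hkne]
    -- unfold A's inner loop at i = k
    have hmj : ¬ pvMaxJ a (a.getD k 0) (k - 1) = -1 := by
      intro hq
      have := (pvMaxJ_neg_iff a (a.getD k 0) (k - 1)).mp hq
      omega
    rcases pvMaxJ_shape a (a.getD k 0) (k - 1) with hq | ⟨jn, hj1, hj2, hj3⟩
    · exact absurd hq hmj
    have hgk : PySem.List.pyGetD a (k : Int) 0 = a.getD k 0 := PySem.List.pyGetD_natCast a k 0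
    have hinner : pvInnerA a (pvListToNum a) (k : Int)
        = some (pvBuildA a (pvListToNum a) (k : Int) (jn : Int)) := by
      unfold pvInnerA
      rw [show ((k : Int) - 1) = ((k - 1 : Nat) : Int) by omega, hgk, pvInnerLoop]
      rw [hj1, if_neg (by omega : ¬ (jn : Int) = -1)]
    rw [hinner]
    -- B's index computations
    have htn : ((k : Int) - 1).toNat = k - 1 := by omega
    have hfj : pvFindJ a (PySem.List.pyGetD a (k : Int) 0) (((k : Int)) - 1).toNat = jn := by
      rw [htn, hgk]
      exact pvFindJ_eq a (a.getD k 0) (k - 1) jn hj1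
    rw [hfj]
    -- A's build equals B's build
    have hklen : k < a.length := by omega
    have hpop : PySem.List.pop? a (k : Int) = some (a[k], a.eraseIdx k) :=
      PySem.List.pop?_natCast a k hklen
    unfold pvBuildA
    simp only [hpop]
    rw [pvSliceErase a jn k (by omega) hklen]
    rw [List.append_assoc]
    simp only [Option.getD_some]
    split_ifs with h1 h2 h3 <;>
      first
        | rfl
        | exact (‹False›).elim
        | omega

-- main equality
theorem pvMain (a : List Int) : next_bigger_t a = next_bigger_t_alt a := by
  cases a with
  | nil => rfl
  | cons x xs => exact pvMainPos (x :: xs) xs.length rfl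

-- ===== VERDICT (by name: the statement is the Claim_ definition above) =====
theorem next_bigger_t_spec : Claim_equal_next_bigger_t := by
  intro a _
  unfold Spec_next_bigger_t
  exact pvMain a
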